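-- pv_equiv track=rewrite | github.com/Wilzhar/uri-online-judge | python/1010.py | descomponerEntrada
-- ===== SOURCE A (Python) =====
-- def descomponerEntrada(entrada):
-- 	pos = 0
-- 	ind = 0
-- 	salida = [0 for i in range(3)]
-- 	for i in range(len(entrada)):
-- 		if(ind==2):
-- 			salida[ind] = entrada[pos: ]
-- 		else:
-- 			if(entrada[i]==" "):
-- 				salida[ind] = entrada[pos: i]
-- 				pos = i+1
-- 				ind+=1
-- 	return salida
-- ===== SOURCE B (Python) =====
-- def descomponerEntrada(entrada):
-- 	a, b, c = entrada.split(' ', 2)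
-- 	return [a, b, c]
-- ===== Notes on version B (the rewrite author's own statement) =====
-- stated objective: idiomatic
-- what changed: Replaced A's stateful character-by-character scan (pos/ind/salida accumulator) with the standard-library splitter: unpack entrada.split(' ', 2) into the three fields.
-- outside the precondition, e.g. on descomponerEntrada(' '): A returns ['', 0, 0], B raises ValueError; on descomponerEntrada(''): A returns [0, 0, 0], B raises ValueError; on descomponerEntrada('ab'): A returns [0, 0, 0], B raises ValueError
import Mathlib
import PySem

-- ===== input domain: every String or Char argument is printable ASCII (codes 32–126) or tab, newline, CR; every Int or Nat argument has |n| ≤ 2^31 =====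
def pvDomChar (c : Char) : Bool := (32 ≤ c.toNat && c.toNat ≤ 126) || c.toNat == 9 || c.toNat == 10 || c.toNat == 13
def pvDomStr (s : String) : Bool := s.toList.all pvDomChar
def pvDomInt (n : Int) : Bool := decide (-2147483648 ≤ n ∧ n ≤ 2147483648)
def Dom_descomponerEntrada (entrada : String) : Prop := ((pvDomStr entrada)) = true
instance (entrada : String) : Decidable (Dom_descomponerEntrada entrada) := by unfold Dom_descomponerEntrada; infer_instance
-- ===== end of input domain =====

-- B replaces A's stateful character-by-character scan (pos/ind/salida state) with one standard-library
-- call entrada.split(' ', 2) (objective: idiomatic). Equal on Pre_: the inputs on which A's result is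
-- three strings (elsewhere A leaves integer-0 placeholders in the result, not a value of the type).

-- ===== PORT A =====
-- the loop body of A, as a helper (st = (pos, ind, salida))
def pvStepA (entrada : String) (st : Int × Int × List String) (i : Int) : Int × Int × List String :=
  if st.2.1 == 2 then
    (st.1, st.2.1, PySem.List.pySetD st.2.2 st.2.1 (PySem.Str.slice entrada (some st.1) none))
  else if PySem.Str.pyGet? entrada i == some ' ' then
    (i + 1, st.2.1 + 1, PySem.List.pySetD st.2.2 st.2.1 (PySem.Str.slice entrada (some st.1) (some i)))
  else st

-- salida = [0 for i in range(3)]: the integer sentinel 0 is rendered as "" — on every input admitted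
-- by Pre_ all three cells are overwritten with strings before the return, so the sentinel never escapes
def descomponerEntrada (entrada : String) : List String :=
  ((PySem.List.pyRange 0 (PySem.Str.len entrada) 1).foldl (pvStepA entrada)
    ((0 : Int), (0 : Int), ["", "", ""])).2.2

-- ===== PORT B =====
-- a, b, c = entrada.split(' ', 2); splitMax? is none only for an empty separator, which " " is not;
-- a split with fewer than three pieces makes the unpacking raise ValueError: outside Pre_
def descomponerEntrada_alt (entrada : String) : List String :=
  match (PySem.Str.splitMax? entrada " " 2).getD [] with
  | [a, b, c] => [a, b, c]
  | _ => []

-- ===== PRECONDITION & SPEC =====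
-- Pre_ excludes the inputs with fewer than two spaces, or whose second space is the final character:
-- there A returns a list still holding the integer 0 (not a string) in one or more cells — not a
-- value of the declared type List String — while B raises ValueError (too few pieces to unpack) or returns '' for the empty third field.
-- Equivalently: the string without its last character has ≥ 2 spaces.
def Pre_descomponerEntrada (entrada : String) : Prop :=
  2 ≤ entrada.toList.dropLast.count ' '
instance (entrada : String) : Decidable (Pre_descomponerEntrada entrada) := by
  unfold Pre_descomponerEntrada; infer_instance

def pvWitness_descomponerEntrada : String := "a b c"

def Spec_descomponerEntrada (entrada : String) (out : List String) : Prop := out = descomponerEntrada_alt entrada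
instance (entrada : String) (out : List String) : Decidable (Spec_descomponerEntrada entrada out) := by unfold Spec_descomponerEntrada; infer_instance

-- ===== CLAIM (what is proved, stated in full; the proofs are below) =====
def Claim_equal_descomponerEntrada : Prop := ∀ (entrada : String), Dom_descomponerEntrada entrada → Pre_descomponerEntrada entrada → Spec_descomponerEntrada entrada (descomponerEntrada entrada)

-- ===== LEMMAS AND PROOFS =====

-- a fold whose step fixes the state is the identity
lemma pvFoldlKeep {S : Type} (f : S → Int → S) (s : S) (l : List Int)
    (h : ∀ i ∈ l, f s i = s) : l.foldl f s = s := by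
  induction l with
  | nil => rfl
  | cons a t ih =>
    rw [List.foldl_cons, h a (by simp)]
    exact ih (fun i hi => h i (by simp [hi]))

-- salida has exactly three cells throughout; the three assignments, computed
lemma pvSet0 (a b c x : String) : PySem.List.pySetD [a, b, c] 0 x = [x, b, c] := rfl
lemma pvSet1 (a b c x : String) : PySem.List.pySetD [a, b, c] 1 x = [a, x, c] := rfl
lemma pvSet2 (a b c x : String) : PySem.List.pySetD [a, b, c] 2 x = [a, b, x] := rfl

-- split a list at its FIRST space
lemma pvSplitFirst (cs : List Char) (h : ' ' ∈ cs) :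
    ∃ u r, cs = u ++ ' ' :: r ∧ ' ' ∉ u := by
  induction cs with
  | nil => cases h
  | cons c t ih =>
    by_cases hc : c = ' '
    · exact ⟨[], t, by simp [hc], by simp⟩
    · have ht : ' ' ∈ t := by
        rcases List.mem_cons.mp h with h1 | h1
        · exact absurd h1.symm hc
        · exact h1
      obtain ⟨u, r, hsplit, hu⟩ := ih ht
      refine ⟨c :: u, r, by simp [hsplit], ?_⟩
      intro hmem
      rcases List.mem_cons.mp hmem with e | e
      · exact hc e.symm
      · exact hu e

-- the recursion equations of the library splitter's worker
lemma pvGoCons (sep : List Char) (fuel m : Nat) (c : Char) (rest cur : List Char)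
    (acc : List (List Char)) :
    PySem.Chars.splitOnMax.go sep (fuel + 1) m (c :: rest) cur acc =
      (if m = 0 then ((cur.reverse ++ (c :: rest)) :: acc).reverse
       else if sep.isPrefixOf (c :: rest) then
         PySem.Chars.splitOnMax.go sep fuel (m - 1) (List.drop sep.length (c :: rest)) [] (cur.reverse :: acc)
       else PySem.Chars.splitOnMax.go sep fuel m rest (c :: cur) acc) := by
  rw [PySem.Chars.splitOnMax.go]

lemma pvGoNil (sep : List Char) (fuel m : Nat) (cur : List Char) (acc : List (List Char)) :
    PySem.Chars.splitOnMax.go sep (fuel + 1) m [] cur acc = (cur.reverse :: acc).reverse := by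
  rw [PySem.Chars.splitOnMax.go]
  omega

-- the worker walks silently over a space-free block
lemma pvGoSkip (u : List Char) (hu : ' ' ∉ u) :
    ∀ (fuel m : Nat) (l cur : List Char) (acc : List (List Char)), m ≠ 0 →
      PySem.Chars.splitOnMax.go [' '] (fuel + u.length) m (u ++ l) cur acc =
      PySem.Chars.splitOnMax.go [' '] fuel m l (u.reverse ++ cur) acc := by
  induction u with
  | nil => intro fuel m l cur acc _; simp
  | cons c t ih =>
    intro fuel m l cur acc hm
    have hc : c ≠ ' ' := fun e => hu (e ▸ List.mem_cons_self)
    have hp : [' '].isPrefixOf (c :: (t ++ l)) = false := by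
      simp [List.isPrefixOf]
      exact fun e => hc e.symm
    have hlen : fuel + (c :: t).length = (fuel + t.length) + 1 := by simp; omega
    rw [hlen, List.cons_append, pvGoCons, if_neg hm, hp]
    simp only [Bool.false_eq_true, if_false]
    rw [ih (fun e => hu (List.mem_cons_of_mem c e)) fuel m l (c :: cur) acc hm]
    simp

-- the worker consumes a leading space while the budget lasts
lemma pvGoSep (fuel m : Nat) (l cur : List Char) (acc : List (List Char)) (hm : m ≠ 0) :
    PySem.Chars.splitOnMax.go [' '] (fuel + 1) m (' ' :: l) cur acc =
      PySem.Chars.splitOnMax.go [' '] fuel (m - 1) l [] (cur.reverse :: acc) := by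
  rw [pvGoCons, if_neg hm, if_pos (by simp [List.isPrefixOf])]
  simp

-- with the budget exhausted the rest is the last piece
lemma pvGoDone (fuel : Nat) (l cur : List Char) (acc : List (List Char)) :
    PySem.Chars.splitOnMax.go [' '] (fuel + 1) 0 l cur acc = ((cur.reverse ++ l) :: acc).reverse := by
  cases l with
  | nil => rw [pvGoNil]; simp
  | cons c rest => rw [pvGoCons, if_pos rfl]

-- B's value on a decomposed input
lemma pvAltEval (entrada : String) (u v w : List Char)
    (hcs : entrada.toList = u ++ ' ' :: (v ++ ' ' :: w))
    (hu : ' ' ∉ u) (hv : ' ' ∉ v) :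
    descomponerEntrada_alt entrada =
      [String.ofList u, String.ofList v, String.ofList w] := by
  have hsp : (" " : String).toList = [' '] := by decide
  unfold descomponerEntrada_alt PySem.Str.splitMax? PySem.Chars.splitMax?
  rw [hsp]
  simp only [List.isEmpty_cons, Bool.false_eq_true, if_false, Option.map_some, Option.getD_some]
  unfold PySem.Chars.splitOnMax
  rw [if_neg (by omega), hcs]
  rw [show ((2 : Int).toNat) = 2 from rfl,
      show (u ++ ' ' :: (v ++ ' ' :: w)).length + 1 = (v.length + w.length + 3) + u.length from by simp; omega,
      pvGoSkip u hu _ 2 _ _ _ (by omega),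
      show v.length + w.length + 3 = (v.length + w.length + 2) + 1 from by omega,
      pvGoSep _ 2 _ _ _ (by omega),
      show v.length + w.length + 2 = (w.length + 2) + v.length from by omega,
      pvGoSkip v hv _ 1 _ _ _ (by omega),
      show w.length + 2 = (w.length + 1) + 1 from by omega,
      pvGoSep _ 1 _ _ _ (by omega),
      pvGoDone]
  simp

-- the three slices A returns, as the pieces of the decomposition
lemma pvSlice1 (entrada : String) (u v w : List Char)
    (hcs : entrada.toList = u ++ ' ' :: (v ++ ' ' :: w)) :
    PySem.Str.slice entrada (some 0) (some (u.length : Int)) = String.ofList u := by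
  unfold PySem.Str.slice
  refine congrArg String.ofList ?_
  simp only [PySem.Chars.slice_eq_listSlice, PySem.List.slice_zero_start,
    PySem.List.slice_to_natCast, hcs]
  exact List.take_left

lemma pvSlice2 (entrada : String) (u v w : List Char)
    (hcs : entrada.toList = u ++ ' ' :: (v ++ ' ' :: w)) :
    PySem.Str.slice entrada (some ((u.length : Int) + 1))
      (some ((u.length : Int) + 1 + (v.length : Int))) = String.ofList v := by
  unfold PySem.Str.slice
  refine congrArg String.ofList ?_
  rw [PySem.Chars.slice_eq_listSlice,
      show ((u.length : Int) + 1) = ((u.length + 1 : Nat) : Int) from by push_cast; ring,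
      show ((u.length + 1 : Nat) : Int) + (v.length : Int) = ((u.length + 1 : Nat) : Int) + ((v.length : Nat) : Int) from rfl,
      PySem.List.slice_natCast_add, hcs,
      show u ++ ' ' :: (v ++ ' ' :: w) = (u ++ [' ']) ++ (v ++ ' ' :: w) from by simp,
      show u.length + 1 = (u ++ [' ']).length from by simp,
      List.drop_left]
  exact List.take_left

lemma pvSlice3 (entrada : String) (u v w : List Char)
    (hcs : entrada.toList = u ++ ' ' :: (v ++ ' ' :: w)) :
    PySem.Str.slice entrada (some ((u.length : Int) + 1 + (v.length : Int) + 1)) none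
      = String.ofList w := by
  unfold PySem.Str.slice
  refine congrArg String.ofList ?_
  rw [PySem.Chars.slice_eq_listSlice,
      show ((u.length : Int) + 1 + (v.length : Int) + 1) = ((u.length + 1 + v.length + 1 : Nat) : Int) from by push_cast; ring,
      PySem.List.slice_from_natCast, hcs,
      show u ++ ' ' :: (v ++ ' ' :: w) = (u ++ ' ' :: v ++ [' ']) ++ w from by simp,
      show u.length + 1 + v.length + 1 = (u ++ ' ' :: v ++ [' ']).length from by simp; omega,
      List.drop_left]

-- A's value on a decomposed input (with a non-empty third field)
lemma pvAEval (entrada : String) (u v w : List Char)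
    (hcs : entrada.toList = u ++ ' ' :: (v ++ ' ' :: w))
    (hu : ' ' ∉ u) (hv : ' ' ∉ v) (hw : w ≠ []) :
    descomponerEntrada entrada =
      [PySem.Str.slice entrada (some 0) (some (u.length : Int)),
       PySem.Str.slice entrada (some ((u.length : Int) + 1)) (some ((u.length : Int) + 1 + (v.length : Int))),
       PySem.Str.slice entrada (some ((u.length : Int) + 1 + (v.length : Int) + 1)) none] := by
  have hlen := congrArg List.length hcs
  simp only [List.length_append, List.length_cons] at hlen
  have hwpos : 0 < w.length := by cases w with | nil => exact absurd rfl hw | cons _ _ => simp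
  -- the three characters A inspects, and the silent stretches between them
  have hget1 : ∀ i : Int, 0 ≤ i → i < (u.length : Int) →
      PySem.List.pyGet? entrada.toList i ≠ some ' ' := by
    intro i hi0 hi1
    have hiu : i.toNat < u.length := by omega
    rw [hcs, PySem.List.pyGet?_of_nonneg _ hi0, List.getElem?_append_left hiu,
        List.getElem?_eq_getElem hiu]
    exact fun e => hu ((Option.some.inj e) ▸ List.getElem_mem hiu)
  have hgetP1 : entrada.toList[u.length]? = some ' ' := by
    rw [hcs, List.getElem?_append_right (le_refl _)]
    simp
  have hget2 : ∀ i : Int, (u.length : Int) + 1 ≤ i → i < (u.length : Int) + 1 + (v.length : Int) →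
      PySem.List.pyGet? entrada.toList i ≠ some ' ' := by
    intro i hi0 hi1
    have hk0 : (u ++ [' ']).length ≤ i.toNat := by simp; omega
    have hkv : i.toNat - (u ++ [' ']).length < v.length := by simp; omega
    rw [hcs,
        show u ++ ' ' :: (v ++ ' ' :: w) = (u ++ [' ']) ++ (v ++ ' ' :: w) from by simp,
        PySem.List.pyGet?_of_nonneg _ (by omega), List.getElem?_append_right hk0,
        List.getElem?_append_left hkv, List.getElem?_eq_getElem hkv]
    exact fun e => hv ((Option.some.inj e) ▸ List.getElem_mem hkv)
  have hgetP2 : PySem.List.pyGet? entrada.toList ((u.length : Int) + 1 + (v.length : Int)) = some ' ' := by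
    rw [hcs,
        show u ++ ' ' :: (v ++ ' ' :: w) = (u ++ ' ' :: v) ++ ' ' :: w from by simp,
        show (u.length : Int) + 1 + (v.length : Int) = ((u ++ ' ' :: v).length : Int) from by
          simp [List.length_append]; omega]
    exact PySem.List.pyGet?_append_length _ _ ' '
  -- split the index range at the two spaces and right after the second one
  have hr1 : PySem.List.pyRange 0 (entrada.toList.length : Int) 1 =
      PySem.List.pyRange 0 (u.length : Int) 1 ++
        ((u.length : Int) :: PySem.List.pyRange ((u.length : Int) + 1) (entrada.toList.length : Int) 1) := by
    rw [PySem.List.pyRange_one_append 0 (u.length : Int) _ (by omega) (by omega)]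
    exact congrArg (fun t => PySem.List.pyRange 0 (u.length : Int) 1 ++ t)
      (PySem.List.pyRange_one_cons (show (u.length : Int) < (entrada.toList.length : Int) by omega))
  have hr2 : PySem.List.pyRange ((u.length : Int) + 1) (entrada.toList.length : Int) 1 =
      PySem.List.pyRange ((u.length : Int) + 1) ((u.length : Int) + 1 + (v.length : Int)) 1 ++
        (((u.length : Int) + 1 + (v.length : Int)) ::
          PySem.List.pyRange ((u.length : Int) + 1 + (v.length : Int) + 1) (entrada.toList.length : Int) 1) := by
    rw [PySem.List.pyRange_one_append ((u.length : Int) + 1) ((u.length : Int) + 1 + (v.length : Int)) _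
          (by omega) (by omega)]
    exact congrArg (fun t => PySem.List.pyRange ((u.length : Int) + 1) ((u.length : Int) + 1 + (v.length : Int)) 1 ++ t)
      (PySem.List.pyRange_one_cons (show (u.length : Int) + 1 + (v.length : Int) < (entrada.toList.length : Int) by omega))
  have hr3 : PySem.List.pyRange ((u.length : Int) + 1 + (v.length : Int) + 1) (entrada.toList.length : Int) 1 =
      ((u.length : Int) + 1 + (v.length : Int) + 1) ::
        PySem.List.pyRange ((u.length : Int) + 1 + (v.length : Int) + 1 + 1) (entrada.toList.length : Int) 1 :=
    PySem.List.pyRange_one_cons (by omega)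
  -- the five phases of the loop
  have hseg1 : (PySem.List.pyRange 0 (u.length : Int) 1).foldl (pvStepA entrada)
      ((0 : Int), (0 : Int), ["", "", ""]) = ((0 : Int), (0 : Int), ["", "", ""]) := by
    refine pvFoldlKeep _ _ _ (fun i hi => ?_)
    rw [PySem.List.mem_pyRange_one] at hi
    simp [pvStepA, hget1 i hi.1 hi.2]
  have hstep1 : pvStepA entrada ((0 : Int), (0 : Int), ["", "", ""]) (u.length : Int) =
      ((u.length : Int) + 1, (1 : Int),
        [PySem.Str.slice entrada (some 0) (some (u.length : Int)), "", ""]) := by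
    simp [pvStepA, hgetP1, pvSet0]
  have hseg2 : (PySem.List.pyRange ((u.length : Int) + 1) ((u.length : Int) + 1 + (v.length : Int)) 1).foldl
      (pvStepA entrada)
      ((u.length : Int) + 1, (1 : Int), [PySem.Str.slice entrada (some 0) (some (u.length : Int)), "", ""]) =
      ((u.length : Int) + 1, (1 : Int), [PySem.Str.slice entrada (some 0) (some (u.length : Int)), "", ""]) := by
    refine pvFoldlKeep _ _ _ (fun i hi => ?_)
    rw [PySem.List.mem_pyRange_one] at hi
    simp [pvStepA, hget2 i hi.1 hi.2]
  have hstep2 : pvStepA entrada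
      ((u.length : Int) + 1, (1 : Int), [PySem.Str.slice entrada (some 0) (some (u.length : Int)), "", ""])
      ((u.length : Int) + 1 + (v.length : Int)) =
      ((u.length : Int) + 1 + (v.length : Int) + 1, (2 : Int),
        [PySem.Str.slice entrada (some 0) (some (u.length : Int)),
         PySem.Str.slice entrada (some ((u.length : Int) + 1)) (some ((u.length : Int) + 1 + (v.length : Int))),
         ""]) := by
    simp [pvStepA, hgetP2, pvSet1]
  have hstep3 : pvStepA entrada
      ((u.length : Int) + 1 + (v.length : Int) + 1, (2 : Int),
        [PySem.Str.slice entrada (some 0) (some (u.length : Int)),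
         PySem.Str.slice entrada (some ((u.length : Int) + 1)) (some ((u.length : Int) + 1 + (v.length : Int))),
         ""])
      ((u.length : Int) + 1 + (v.length : Int) + 1) =
      ((u.length : Int) + 1 + (v.length : Int) + 1, (2 : Int),
        [PySem.Str.slice entrada (some 0) (some (u.length : Int)),
         PySem.Str.slice entrada (some ((u.length : Int) + 1)) (some ((u.length : Int) + 1 + (v.length : Int))),
         PySem.Str.slice entrada (some ((u.length : Int) + 1 + (v.length : Int) + 1)) none]) := by
    simp [pvStepA, pvSet2]
  have hseg3 : (PySem.List.pyRange ((u.length : Int) + 1 + (v.length : Int) + 1 + 1) (entrada.toList.length : Int) 1).foldl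
      (pvStepA entrada)
      ((u.length : Int) + 1 + (v.length : Int) + 1, (2 : Int),
        [PySem.Str.slice entrada (some 0) (some (u.length : Int)),
         PySem.Str.slice entrada (some ((u.length : Int) + 1)) (some ((u.length : Int) + 1 + (v.length : Int))),
         PySem.Str.slice entrada (some ((u.length : Int) + 1 + (v.length : Int) + 1)) none]) =
      ((u.length : Int) + 1 + (v.length : Int) + 1, (2 : Int),
        [PySem.Str.slice entrada (some 0) (some (u.length : Int)),
         PySem.Str.slice entrada (some ((u.length : Int) + 1)) (some ((u.length : Int) + 1 + (v.length : Int))),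
         PySem.Str.slice entrada (some ((u.length : Int) + 1 + (v.length : Int) + 1)) none]) := by
    refine pvFoldlKeep _ _ _ (fun i _ => ?_)
    simp [pvStepA, pvSet2]
  unfold descomponerEntrada
  rw [PySem.Str.len_eq, hr1, List.foldl_append, List.foldl_cons, hseg1, hstep1,
      hr2, List.foldl_append, List.foldl_cons, hseg2, hstep2,
      hr3, List.foldl_cons, hstep3, hseg3]

-- ===== VERDICT (by name: the statement is the Claim_ definition above) =====
theorem descomponerEntrada_spec : Claim_equal_descomponerEntrada := by
  intro entrada _ hpre
  unfold Spec_descomponerEntrada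
  unfold Pre_descomponerEntrada at hpre
  have hsub : entrada.toList.dropLast.count ' ' ≤ entrada.toList.count ' ' :=
    (List.dropLast_sublist _).count_le _
  have hmem : ' ' ∈ entrada.toList := by
    rw [← List.count_pos_iff]; omega
  obtain ⟨u, r, hcs1, hu⟩ := pvSplitFirst _ hmem
  have hcntu : u.count ' ' = 0 := List.count_eq_zero_of_not_mem hu
  have hmem2 : ' ' ∈ r := by
    rw [← List.count_pos_iff]
    have : entrada.toList.count ' ' = u.count ' ' + (1 + r.count ' ') := by
      simp [hcs1, List.count_append]
      omega
    omega
  obtain ⟨v, w, hcs2, hv⟩ := pvSplitFirst _ hmem2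
  have hcs : entrada.toList = u ++ ' ' :: (v ++ ' ' :: w) := by rw [hcs1, hcs2]
  have hw : w ≠ [] := by
    intro hwe
    have hshape : entrada.toList = (u ++ ' ' :: v) ++ [' '] := by
      rw [hcs, hwe]; simp
    have hdl : entrada.toList.dropLast = u ++ ' ' :: v := by
      rw [hshape, List.dropLast_concat]
    rw [hdl] at hpre
    have hcv : v.count ' ' = 0 := List.count_eq_zero_of_not_mem hv
    simp [List.count_append, hcntu, hcv] at hpre
  rw [pvAEval entrada u v w hcs hu hv hw, pvAltEval entrada u v w hcs hu hv,
      pvSlice1 entrada u v w hcs, pvSlice2 entrada u v w hcs, pvSlice3 entrada u v w hcs]
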